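-- pv_equiv track=rewrite | github.com/pirate/chrome-cdp-extension-bridge | client/python/translate.py | route_for
-- ===== SOURCE A (Python) =====
-- def route_for(method: str, routes: dict) -> str:
--     routes = routes or {}
--     if method in routes:
--         return routes[method]
--     best_prefix_len = -1
--     best_route = None
--     for pattern, route in routes.items():
--         if pattern == "*.*" or not pattern.endswith(".*"):
--             continue
--         prefix = pattern[:-1]
--         if method.startswith(prefix) and len(prefix) > best_prefix_len:
--             best_prefix_len = len(prefix)
--             best_route = route
--     if best_route is not None:
--         return best_route
--     if "*.*" in routes:
--         return routes["*.*"]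
--     return "direct_cdp"
-- ===== SOURCE B (Python) =====
-- def route_for(method: str, routes: dict) -> str:
--     routes = routes or {}
--     if method in routes:
--         return routes[method]
--     best = None
--     for i, ch in enumerate(method):
--         if ch == ".":
--             pat = method[: i + 1] + "*"
--             if pat != "*.*" and pat in routes:
--                 best = routes[pat]
--     if best is not None:
--         return best
--     return routes.get("*.*", "direct_cdp")
-- ===== Notes on version B (the rewrite author's own statement) =====
-- stated objective: alternative
-- what changed: Instead of scanning every route entry and keeping the longest matching '.*' prefix, B walks the method string's dot positions and looks each candidate prefix pattern up in the dict, so the route table is never scanned.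
import Mathlib
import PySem

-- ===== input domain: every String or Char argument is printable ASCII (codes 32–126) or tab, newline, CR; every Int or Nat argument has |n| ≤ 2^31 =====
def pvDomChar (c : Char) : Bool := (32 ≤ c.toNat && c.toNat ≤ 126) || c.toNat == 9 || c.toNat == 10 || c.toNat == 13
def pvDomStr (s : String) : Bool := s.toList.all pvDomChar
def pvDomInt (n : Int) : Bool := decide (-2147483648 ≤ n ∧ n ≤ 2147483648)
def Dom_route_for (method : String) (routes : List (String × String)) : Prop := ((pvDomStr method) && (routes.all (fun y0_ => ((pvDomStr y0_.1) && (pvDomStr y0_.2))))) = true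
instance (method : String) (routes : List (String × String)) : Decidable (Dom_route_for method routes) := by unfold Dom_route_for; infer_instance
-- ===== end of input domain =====

-- B replaces the scan over all route entries by a walk over the method's dot positions with
-- a dict lookup per candidate prefix pattern (objective: alternative algorithm, same result).

-- ===== PORT A =====
-- 'routes = routes or {}' only replaces an empty table by an empty table; ported as the identity.
def route_for (method : String) (routes : List (String × String)) : String :=
  match (PySem.Dict.mk routes).get? method with
  | some r => r
  | none =>
    let st := routes.foldl
      (fun (st : Int × Option String) pr =>
        if pr.1 == "*.*" || !(PySem.Str.endswith pr.1 ".*") then st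
        else
          let pfx := PySem.Str.slice pr.1 none (some (-1))
          if PySem.Str.startswith method pfx && decide (st.1 < PySem.Str.len pfx)
          then (PySem.Str.len pfx, some pr.2)
          else st)
      ((-1 : Int), (none : Option String))
    match st.2 with
    | some r => r
    | none =>
      match (PySem.Dict.mk routes).get? "*.*" with
      | some r => r
      | none => "direct_cdp"

-- ===== PORT B =====
def route_for_alt (method : String) (routes : List (String × String)) : String :=
  match (PySem.Dict.mk routes).get? method with
  | some r => r
  | none =>
    let best := (PySem.List.enumerate method.toList 0).foldl
      (fun (best : Option String) p =>
        if p.2 == '.' then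
          -- method[:i+1] + "*", built on code points (str '+' is list append; exact)
          let pat := String.ofList (PySem.List.slice method.toList none (some (p.1 + 1)) ++ ['*'])
          if pat != "*.*" then
            match (PySem.Dict.mk routes).get? pat with
            | some r => some r
            | none => best
          else best
        else best)
      (none : Option String)
    match best with
    | some r => r
    | none => (PySem.Dict.mk routes).getD "*.*" "direct_cdp"

-- ===== PRECONDITION & SPEC =====
def Spec_route_for (method : String) (routes : List (String × String)) (out : String) : Prop := out = route_for_alt method routes
instance (method : String) (routes : List (String × String)) (out : String) : Decidable (Spec_route_for method routes out) := by unfold Spec_route_for; infer_instance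

-- ===== CLAIM (what is proved, stated in full; the proofs are below) =====
def Claim_equal_route_for : Prop := ∀ (method : String) (routes : List (String × String)), Dom_route_for method routes → Spec_route_for method routes (route_for method routes)

-- ===== LEMMAS AND PROOFS =====

-- An entry of the table that A's loop accepts: a non-'*.*' pattern ending in '.*' whose
-- prefix (pattern minus the trailing '*') is a prefix of the method.
abbrev hitP (method : String) (pr : String × String) : Prop :=
  ¬ (pr.1 = "*.*") ∧ PySem.Str.endswith pr.1 ".*" = true ∧
    PySem.Str.startswith method (PySem.Str.slice pr.1 none (some (-1))) = true

-- the prefix length A's loop compares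
def plen (pr : String × String) : Int := PySem.Str.len (PySem.Str.slice pr.1 none (some (-1)))

-- the value A's loop leaves in best_route, starting from best_prefix_len = m
def selA (method : String) : List (String × String) → Int → Option String
  | [], _ => none
  | pr :: t, m =>
    if hitP method pr ∧ m < plen pr then (selA method t (plen pr)).or (some pr.2)
    else selA method t m

-- the value A's loop leaves in best_prefix_len
def maxL (method : String) (l : List (String × String)) (m : Int) : Int :=
  l.foldl (fun m pr => if hitP method pr ∧ m < plen pr then plen pr else m) m

-- B's candidate at dot position k
def candB (method : String) (routes : List (String × String)) (k : Nat) : Option String :=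
  if method.toList[k]? = some '.' ∧
      String.ofList (method.toList.take (k + 1) ++ ['*']) ≠ "*.*" then
    (PySem.Dict.mk routes).get? (String.ofList (method.toList.take (k + 1) ++ ['*']))
  else none

lemma bodyA_step (method : String) (pr : String × String) (st : Int × Option String) :
    (if pr.1 == "*.*" || !(PySem.Str.endswith pr.1 ".*") then st
     else
       let pfx := PySem.Str.slice pr.1 none (some (-1))
       if PySem.Str.startswith method pfx && decide (st.1 < PySem.Str.len pfx)
       then (PySem.Str.len pfx, some pr.2)
       else st)
    = if hitP method pr ∧ st.1 < plen pr then (plen pr, some pr.2) else st := by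
  by_cases h1 : pr.1 = "*.*" <;>
    by_cases h2 : PySem.Str.endswith pr.1 ".*" = true <;>
    by_cases h3 : PySem.Str.startswith method (PySem.Str.slice pr.1 none (some (-1))) = true <;>
    by_cases hlt : st.1 < plen pr <;>
    simp_all [hitP, plen]

lemma foldA_char (method : String) (l : List (String × String)) (m : Int) (b : Option String) :
    (l.foldl
      (fun (st : Int × Option String) pr =>
        if pr.1 == "*.*" || !(PySem.Str.endswith pr.1 ".*") then st
        else
          let pfx := PySem.Str.slice pr.1 none (some (-1))
          if PySem.Str.startswith method pfx && decide (st.1 < PySem.Str.len pfx)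
          then (PySem.Str.len pfx, some pr.2)
          else st)
      (m, b)).2 = (selA method l m).or b := by
  have hb : (fun (st : Int × Option String) pr =>
      if pr.1 == "*.*" || !(PySem.Str.endswith pr.1 ".*") then st
      else
        let pfx := PySem.Str.slice pr.1 none (some (-1))
        if PySem.Str.startswith method pfx && decide (st.1 < PySem.Str.len pfx)
        then (PySem.Str.len pfx, some pr.2)
        else st)
      = (fun (st : Int × Option String) pr =>
          if hitP method pr ∧ st.1 < plen pr then (plen pr, some pr.2) else st) :=
    funext fun st => funext fun pr => bodyA_step method pr st
  rw [hb]; clear hb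
  induction l generalizing m b with
  | nil => simp [selA]
  | cons pr t ih =>
    simp only [List.foldl_cons, selA]
    by_cases hc : hitP method pr ∧ m < plen pr
    · rw [if_pos hc, if_pos hc, ih]
      cases selA method t (plen pr) <;> rfl
    · rw [if_neg hc, if_neg hc, ih]

lemma foldl_overwrite {α β : Type} (f : α → Option β) (l : List α) (b : Option β) :
    l.foldl (fun b x => (f x).or b) b
      = ((l.filterMap f).getLast?).or b := by
  induction l generalizing b with
  | nil => simp
  | cons x t ih =>
    simp only [List.foldl_cons, List.filterMap_cons]
    cases hfx : f x with
    | none => simpa using ih b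
    | some r =>
      rw [show (some r).or b = some r from rfl]
      rw [ih (some r)]
      cases e : t.filterMap f with
      | nil => simp
      | cons y ys =>
        have hs : (y :: ys).getLast?.isSome := by simp
        obtain ⟨z, hz⟩ := Option.isSome_iff_exists.mp hs
        rw [hz, List.getLast?_cons_cons, hz]
        rfl

-- B's loop body as a single Option-valued candidate per enumerate element
def FB (method : String) (routes : List (String × String)) (p : Int × Char) : Option String :=
  if p.2 == '.' then
    if String.ofList (PySem.List.slice method.toList none (some (p.1 + 1)) ++ ['*']) != "*.*" then
      (PySem.Dict.mk routes).get? (String.ofList (PySem.List.slice method.toList none (some (p.1 + 1)) ++ ['*']))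
    else none
  else none

lemma enum_filterMap (method : String) (routes : List (String × String)) :
    ∀ (xs : List Char) (s : Nat), xs = method.toList.drop s →
      (PySem.List.enumerate xs (s : Int)).filterMap (FB method routes)
        = (List.range' s xs.length).filterMap (candB method routes) := by
  intro xs
  induction xs with
  | nil => intro s h; simp [PySem.List.enumerate_nil]
  | cons c t ih =>
    intro s h
    have hcs : method.toList[s]? = some c := by
      have h0 : (method.toList.drop s)[0]? = some c := by rw [← h]; rfl
      simpa [List.getElem?_drop] using h0
    have hdt : t = method.toList.drop (s + 1) := by
      have h1 : method.toList.drop (s + 1) = (method.toList.drop s).drop 1 := by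
        rw [List.drop_drop]
      rw [h1, ← h]
      rfl
    have hs1 : ((s : Int) + 1) = ((s + 1 : Nat) : Int) := by push_cast; ring
    rw [PySem.List.enumerate_cons, hs1, List.filterMap_cons,
      show (c :: t).length = t.length + 1 from rfl, List.range'_succ, List.filterMap_cons]
    have hhead : FB method routes ((s : Int), c) = candB method routes s := by
      simp only [FB, candB]
      rw [show ((s : Int) + 1) = ((s + 1 : Nat) : Int) from by push_cast; ring,
        PySem.List.slice_to_natCast]
      by_cases hcdot : c = '.'
      · subst hcdot
        rw [if_pos (by simp)]
        by_cases h2 : String.ofList (method.toList.take (s + 1) ++ ['*']) = "*.*"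
        · rw [if_neg (by simp [h2]), if_neg (by simp [h2])]
        · rw [if_pos (bne_iff_ne.mpr h2), if_pos ⟨hcs, h2⟩]
      · rw [if_neg (by simp [hcdot]), if_neg (by simp [hcs, hcdot])]
    rw [hhead, ih (s + 1) hdt]

lemma foldB_char (method : String) (routes : List (String × String)) :
    ((PySem.List.enumerate method.toList 0).foldl
      (fun (best : Option String) p =>
        if p.2 == '.' then
          let pat := String.ofList (PySem.List.slice method.toList none (some (p.1 + 1)) ++ ['*'])
          if pat != "*.*" then
            match (PySem.Dict.mk routes).get? pat with
            | some r => some r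
            | none => best
          else best
        else best)
      (none : Option String))
      = ((List.range method.toList.length).filterMap (candB method routes)).getLast? := by
  have hb : (fun (best : Option String) (p : Int × Char) =>
      if p.2 == '.' then
        let pat := String.ofList (PySem.List.slice method.toList none (some (p.1 + 1)) ++ ['*'])
        if pat != "*.*" then
          match (PySem.Dict.mk routes).get? pat with
          | some r => some r
          | none => best
        else best
      else best)
      = (fun (best : Option String) p => (FB method routes p).or best) := by
    funext best p
    simp only [FB]
    by_cases h1 : p.2 == '.'
    · rw [if_pos h1, if_pos h1]
      by_cases h2 : String.ofList (PySem.List.slice method.toList none (some (p.1 + 1)) ++ ['*']) != "*.*"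
      · rw [if_pos h2, if_pos h2]
        cases (PySem.Dict.mk routes).get?
            (String.ofList (PySem.List.slice method.toList none (some (p.1 + 1)) ++ ['*'])) <;> rfl
      · rw [if_neg h2, if_neg h2]
        rfl
    · rw [if_neg h1, if_neg h1]
      rfl
  rw [hb, foldl_overwrite, Option.or_none]
  have h0 : method.toList = method.toList.drop 0 := rfl
  have he := enum_filterMap method routes method.toList 0 h0
  rw [show ((0 : Nat) : Int) = (0 : Int) from rfl] at he
  rw [he, List.range_eq_range']

lemma get?_mk_eq_find? (l : List (String × String)) (k : String) :
    (PySem.Dict.mk l).get? k = (l.find? (fun pr => pr.1 == k)).map (·.2) := by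
  induction l with
  | nil => rfl
  | cons pr t ih =>
    rw [show (pr :: t) = ((pr.1, pr.2) :: t) from rfl, PySem.Dict.get?_mk_cons]
    by_cases h : pr.1 == k
    · simp [h]
    · simp only [List.find?_cons]
      rw [if_neg (by simpa using h)]
      simp only [Bool.not_eq_true] at h
      rw [h]
      exact ih

-- structure of a hit: its pattern is (a dotted prefix of method) ++ "*"
lemma hit_struct {method : String} {pr : String × String} (h : hitP method pr) :
    ∃ t : Nat, 1 ≤ t ∧ t ≤ method.toList.length ∧ method.toList[t - 1]? = some '.' ∧
      pr.1.toList = method.toList.take t ++ ['*'] ∧ plen pr = (t : Int) := by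
  obtain ⟨h1, h2, h3⟩ := h
  have h2' : ['.', '*'] <:+ pr.1.toList := by
    simpa [PySem.Chars.endswith_iff] using h2
  have h3' : pr.1.toList.dropLast <+: method.toList := by
    simpa [PySem.List.slice_to_neg_one, PySem.Chars.startswith_iff] using h3
  obtain ⟨u, hu⟩ := h2'
  have hdrop : pr.1.toList.dropLast = u ++ ['.'] := by
    rw [← hu, show u ++ ['.', '*'] = (u ++ ['.']) ++ ['*'] by simp]
    exact List.dropLast_concat
  rw [hdrop] at h3'
  obtain ⟨w, hw⟩ := h3'
  refine ⟨u.length + 1, by omega, ?_, ?_, ?_, ?_⟩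
  · have := congrArg List.length hw
    simp at this
    have hlen : method.toList.length = method.length := by simp
    omega
  · rw [← hw]
    simp
  · rw [← hu, ← hw]
    rw [List.take_left' (by simp)]
    simp
  · simp [plen, PySem.List.slice_to_neg_one, hdrop]

lemma hit_of_key {method : String} {pr : String × String} {k : Nat}
    (hk : method.toList[k]? = some '.')
    (hK : pr.1.toList = method.toList.take (k + 1) ++ ['*'])
    (hne : pr.1 ≠ "*.*") :
    hitP method pr ∧ plen pr = ((k + 1 : Nat) : Int) := by
  have hk' : k < method.toList.length := (List.getElem?_eq_some_iff.mp hk).1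
  have hlen : method.toList.length = method.length := by simp
  have htk : method.toList.take (k + 1) = method.toList.take k ++ ['.'] := by
    simp [List.take_add_one, hk]
  refine ⟨⟨hne, ?_, ?_⟩, ?_⟩
  · simp only [PySem.Str.endswith_eq, PySem.Chars.endswith_iff]
    refine ⟨method.toList.take k, ?_⟩
    rw [hK, htk]
    simp
  · simp only [PySem.Str.startswith_eq, PySem.Str.slice_to_neg_one,
      PySem.Chars.startswith_iff]
    rw [hK, List.dropLast_concat]
    exact List.take_prefix _ _
  · simp [plen, PySem.List.slice_to_neg_one, hK, List.length_take]
    omega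

lemma hit_key_unique {method : String} {pr qr : String × String}
    (hp : hitP method pr) (hq : hitP method qr) (h : plen pr = plen qr) : pr.1 = qr.1 := by
  obtain ⟨t1, _, _, _, hp4, hp5⟩ := hit_struct hp
  obtain ⟨t2, _, _, _, hq4, hq5⟩ := hit_struct hq
  have ht : t1 = t2 := by
    have : (t1 : Int) = (t2 : Int) := by rw [← hp5, ← hq5, h]
    exact_mod_cast this
  have hl : pr.1.toList = qr.1.toList := by rw [hp4, hq4, ht]
  have := congrArg String.ofList hl
  simpa using this

lemma hit_plen_pos {method : String} {pr : String × String} (h : hitP method pr) :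
    1 ≤ plen pr := by
  obtain ⟨t, ht1, _, _, _, ht5⟩ := hit_struct h
  rw [ht5]
  exact_mod_cast ht1

lemma le_maxL (method : String) (l : List (String × String)) (m : Int) :
    m ≤ maxL method l m := by
  induction l generalizing m with
  | nil => simp [maxL]
  | cons pr t ih =>
    simp only [maxL, List.foldl_cons]
    by_cases hc : hitP method pr ∧ m < plen pr
    · rw [if_pos hc]
      exact le_trans (le_of_lt hc.2) (ih (plen pr))
    · rw [if_neg hc]
      exact ih m

lemma plen_le_maxL {method : String} {l : List (String × String)} {pr : String × String}
    (hm : pr ∈ l) (hh : hitP method pr) {m : Int} (hlt : m < plen pr) :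
    plen pr ≤ maxL method l m := by
  induction l generalizing m with
  | nil => cases hm
  | cons qr t ih =>
    simp only [maxL, List.foldl_cons]
    rcases List.mem_cons.mp hm with heq | hmt
    · subst heq
      rw [if_pos ⟨hh, hlt⟩]
      exact le_maxL method t (plen pr)
    · by_cases hc : hitP method qr ∧ m < plen qr
      · rw [if_pos hc]
        by_cases h2 : plen qr < plen pr
        · exact ih hmt h2
        · exact le_trans (by omega) (le_maxL method t (plen qr))
      · rw [if_neg hc]
        exact ih hmt hlt

lemma maxL_of_no_hit {method : String} {l : List (String × String)} {m : Int}
    (h : ∀ pr ∈ l, ¬ (hitP method pr ∧ m < plen pr)) : maxL method l m = m := by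
  induction l generalizing m with
  | nil => rfl
  | cons qr t ih =>
    simp only [maxL, List.foldl_cons]
    rw [if_neg (h qr List.mem_cons_self)]
    exact ih (fun pr hmem => h pr (List.mem_cons_of_mem _ hmem))

lemma selA_of_no_hit {method : String} {l : List (String × String)} {m : Int}
    (h : ∀ pr ∈ l, ¬ (hitP method pr ∧ m < plen pr)) : selA method l m = none := by
  induction l generalizing m with
  | nil => rfl
  | cons qr t ih =>
    simp only [selA]
    rw [if_neg (h qr List.mem_cons_self)]
    exact ih (fun pr hmem => h pr (List.mem_cons_of_mem _ hmem))

lemma exists_hit_maxL {method : String} {l : List (String × String)} {m : Int}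
    (h : ∃ pr ∈ l, hitP method pr ∧ m < plen pr) :
    ∃ pr ∈ l, hitP method pr ∧ m < plen pr ∧ plen pr = maxL method l m := by
  induction l generalizing m with
  | nil => obtain ⟨pr, hmem, _⟩ := h; cases hmem
  | cons qr t ih =>
    by_cases hc : hitP method qr ∧ m < plen qr
    · have hm : maxL method (qr :: t) m = maxL method t (plen qr) := by
        simp only [maxL, List.foldl_cons, if_pos hc]
      rw [hm]
      by_cases h2 : ∃ pr ∈ t, hitP method pr ∧ plen qr < plen pr
      · obtain ⟨pr, hmem, hhit, hlt, hmax⟩ := ih h2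
        exact ⟨pr, List.mem_cons_of_mem _ hmem, hhit, by omega, hmax⟩
      · push_neg at h2
        have hno : ∀ pr ∈ t, ¬ (hitP method pr ∧ plen qr < plen pr) := by
          intro pr hmem hcon
          exact absurd (h2 pr hmem hcon.1) (by omega)
        rw [maxL_of_no_hit hno]
        exact ⟨qr, List.mem_cons_self, hc.1, hc.2, rfl⟩
    · have hm : maxL method (qr :: t) m = maxL method t m := by
        simp only [maxL, List.foldl_cons, if_neg hc]
      rw [hm]
      have h' : ∃ pr ∈ t, hitP method pr ∧ m < plen pr := by
        obtain ⟨pr, hmem, hhit, hlt⟩ := h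
        rcases List.mem_cons.mp hmem with heq | hmt
        · exact absurd ⟨heq ▸ hhit, heq ▸ hlt⟩ hc
        · exact ⟨pr, hmt, hhit, hlt⟩
      obtain ⟨pr, hmem, hhit, hlt, hmax⟩ := ih h'
      exact ⟨pr, List.mem_cons_of_mem _ hmem, hhit, hlt, hmax⟩

lemma find?_congr_mem {α : Type} {p q : α → Bool} :
    ∀ (l : List α), (∀ x ∈ l, p x = q x) → l.find? p = l.find? q := by
  intro l
  induction l with
  | nil => intro _; rfl
  | cons x t ih =>
    intro h
    rw [List.find?_cons, List.find?_cons, h x List.mem_cons_self]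
    cases q x
    · exact ih (fun y hy => h y (List.mem_cons_of_mem _ hy))
    · rfl

lemma selA_of_hit {method : String} (l : List (String × String)) (m : Int)
    (h : ∃ pr ∈ l, hitP method pr ∧ m < plen pr) :
    selA method l m
      = (l.find? (fun pr => decide (hitP method pr) && decide (plen pr = maxL method l m))).map (·.2) := by
  induction l generalizing m with
  | nil => obtain ⟨pr, hmem, _⟩ := h; cases hmem
  | cons qr t ih =>
    by_cases hc : hitP method qr ∧ m < plen qr
    · have hm : maxL method (qr :: t) m = maxL method t (plen qr) := by
        simp only [maxL, List.foldl_cons, if_pos hc]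
      simp only [selA]
      rw [if_pos hc, hm]
      by_cases h2 : ∃ pr ∈ t, hitP method pr ∧ plen qr < plen pr
      · rw [ih (plen qr) h2]
        have hgt : plen qr < maxL method t (plen qr) := by
          obtain ⟨pr, hmem, hhit, hlt⟩ := h2
          exact lt_of_lt_of_le hlt (plen_le_maxL hmem hhit hlt)
        have hb1 : (decide (hitP method qr) && decide (plen qr = maxL method t (plen qr))) = false := by
          rw [Bool.eq_false_iff]
          simp only [ne_eq, Bool.and_eq_true, decide_eq_true_eq, not_and]
          intro _ he
          omega
        rw [List.find?_cons, hb1]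
        obtain ⟨pr, hmem, hhit, hlt, hmax⟩ := exists_hit_maxL h2
        have hsome : (t.find? (fun pr => decide (hitP method pr) && decide (plen pr = maxL method t (plen qr)))).isSome :=
          List.find?_isSome.mpr ⟨pr, hmem, by rw [decide_eq_true hhit, decide_eq_true hmax]; rfl⟩
        obtain ⟨x, hx⟩ := Option.isSome_iff_exists.mp hsome
        rw [hx]
        rfl
      · push_neg at h2
        have hno : ∀ pr ∈ t, ¬ (hitP method pr ∧ plen qr < plen pr) := by
          intro pr hmem hcon
          exact absurd (h2 pr hmem hcon.1) (by omega)
        rw [selA_of_no_hit hno, maxL_of_no_hit hno]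
        have hb2 : (decide (hitP method qr) && decide (plen qr = plen qr)) = true := by
          rw [decide_eq_true hc.1, decide_eq_true (show plen qr = plen qr from rfl)]
          rfl
        rw [List.find?_cons, hb2]
        rfl
    · have hm : maxL method (qr :: t) m = maxL method t m := by
        simp only [maxL, List.foldl_cons, if_neg hc]
      simp only [selA]
      rw [if_neg hc, hm]
      have h' : ∃ pr ∈ t, hitP method pr ∧ m < plen pr := by
        obtain ⟨pr, hmem, hhit, hlt⟩ := h
        rcases List.mem_cons.mp hmem with heq | hmt
        · exact absurd ⟨heq ▸ hhit, heq ▸ hlt⟩ hc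
        · exact ⟨pr, hmt, hhit, hlt⟩
      rw [ih m h']
      have hside : (decide (hitP method qr) && decide (plen qr = maxL method t m)) = false := by
        rw [Bool.eq_false_iff]
        simp only [ne_eq, Bool.and_eq_true, decide_eq_true_eq, not_and]
        intro hh hq
        obtain ⟨pr, hmem, hhit, hlt⟩ := h'
        have hle := plen_le_maxL hmem hhit hlt
        exact hc ⟨hh, by omega⟩
      rw [List.find?_cons, hside]

lemma getLast?_filterMap_range {β : Type} (f : Nat → Option β) (n j : Nat) {v : β}
    (hj : j < n) (hv : f j = some v) (hafter : ∀ k, j < k → k < n → f k = none) :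
    ((List.range n).filterMap f).getLast? = some v := by
  have hn : n = (j + 1) + (n - (j + 1)) := by omega
  rw [hn, List.range_add, List.filterMap_append]
  have h2 : (((List.range (n - (j + 1))).map (fun i => j + 1 + i)).filterMap f) = [] := by
    rw [List.filterMap_eq_nil_iff]
    intro a ha
    obtain ⟨i, hi, rfl⟩ := List.mem_map.mp ha
    exact hafter _ (by omega) (by have := List.mem_range.mp hi; omega)
  rw [h2, List.append_nil, List.range_succ, List.filterMap_append]
  rw [show List.filterMap f [j] = [v] from by simp [hv]]
  exact List.getLast?_concat

lemma filterMap_range_none {β : Type} (f : Nat → Option β) (n : Nat)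
    (h : ∀ k, k < n → f k = none) : (List.range n).filterMap f = [] := by
  rw [List.filterMap_eq_nil_iff]
  intro a ha
  exact h a (List.mem_range.mp ha)

lemma main_char (method : String) (routes : List (String × String)) :
    selA method routes (-1)
      = ((List.range method.toList.length).filterMap (candB method routes)).getLast? := by
  by_cases hex : ∃ pr ∈ routes, hitP method pr
  · obtain ⟨pr0, hmem0, hhit0⟩ := hex
    have h1 : ∃ pr ∈ routes, hitP method pr ∧ (-1 : Int) < plen pr :=
      ⟨pr0, hmem0, hhit0, lt_of_lt_of_le (by norm_num) (hit_plen_pos hhit0)⟩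
    obtain ⟨prm, hmemm, hhitm, hltm, hmaxm⟩ := exists_hit_maxL h1
    obtain ⟨t0, ht1, ht2, ht3, ht4, ht5⟩ := hit_struct hhitm
    have hkey : prm.1 = String.ofList (method.toList.take t0 ++ ['*']) := by
      have hc := congrArg String.ofList ht4
      rwa [String.ofList_toList] at hc
    have hpat_ne : String.ofList (method.toList.take t0 ++ ['*']) ≠ "*.*" := hkey ▸ hhitm.1
    have hK : maxL method routes (-1) = (t0 : Int) := by rw [← hmaxm, ht5]
    have hkeyhit : ∀ pr : String × String,
        pr.1 = String.ofList (method.toList.take t0 ++ ['*']) →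
        hitP method pr ∧ plen pr = (t0 : Int) := by
      intro pr he
      have hlist : pr.1.toList = method.toList.take t0 ++ ['*'] := by
        rw [he, String.toList_ofList]
      have ht0 : t0 - 1 + 1 = t0 := by omega
      have hres := hit_of_key (k := t0 - 1) ht3 (by rw [ht0]; exact hlist)
        (by rw [he]; exact hpat_ne)
      rw [ht0] at hres
      exact hres
    rw [selA_of_hit routes (-1) h1]
    have hfind : routes.find?
          (fun pr => decide (hitP method pr) && decide (plen pr = maxL method routes (-1)))
        = routes.find? (fun pr => pr.1 == String.ofList (method.toList.take t0 ++ ['*'])) := by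
      apply find?_congr_mem
      intro pr _
      by_cases hh : hitP method pr
      · by_cases hpl : plen pr = maxL method routes (-1)
        · have heq : pr.1 = prm.1 := hit_key_unique hh hhitm (by rw [hpl, ← hmaxm])
          rw [beq_iff_eq.mpr (heq.trans hkey), decide_eq_true hh, decide_eq_true hpl]
          rfl
        · have hne2 : pr.1 ≠ String.ofList (method.toList.take t0 ++ ['*']) :=
            fun he => hpl (by rw [(hkeyhit pr he).2, hK])
          rw [beq_eq_false_iff_ne.mpr hne2, decide_eq_false hpl, Bool.and_false]
      · have hne2 : pr.1 ≠ String.ofList (method.toList.take t0 ++ ['*']) :=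
          fun he => hh (hkeyhit pr he).1
        rw [beq_eq_false_iff_ne.mpr hne2, decide_eq_false hh, Bool.false_and]
    rw [hfind, ← get?_mk_eq_find?]
    have hcand : candB method routes (t0 - 1)
        = (PySem.Dict.mk routes).get? (String.ofList (method.toList.take t0 ++ ['*'])) := by
      unfold candB
      have ht0 : t0 - 1 + 1 = t0 := by omega
      rw [ht0]
      exact if_pos ⟨ht3, hpat_ne⟩
    have hsome : ∃ v, (PySem.Dict.mk routes).get?
        (String.ofList (method.toList.take t0 ++ ['*'])) = some v := by
      rw [get?_mk_eq_find?]
      have hiss : (routes.find?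
          (fun pr => pr.1 == String.ofList (method.toList.take t0 ++ ['*']))).isSome :=
        List.find?_isSome.mpr ⟨prm, hmemm, by simp [hkey]⟩
      obtain ⟨x, hx⟩ := Option.isSome_iff_exists.mp hiss
      exact ⟨x.2, by rw [hx]; rfl⟩
    obtain ⟨v, hv⟩ := hsome
    have hafter : ∀ k, t0 - 1 < k → k < method.toList.length →
        candB method routes k = none := by
      intro k hk1 hk2
      unfold candB
      by_cases hcnd : method.toList[k]? = some '.' ∧
          String.ofList (method.toList.take (k + 1) ++ ['*']) ≠ "*.*"
      · rw [if_pos hcnd]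
        by_contra hne
        obtain ⟨r, hr⟩ := Option.ne_none_iff_exists'.mp hne
        have hmemr : (String.ofList (method.toList.take (k + 1) ++ ['*']), r) ∈ routes :=
          PySem.Dict.mem_items_of_get?_eq_some _ hr
        have hres := hit_of_key (pr := (String.ofList (method.toList.take (k + 1) ++ ['*']), r))
          (k := k) hcnd.1 (by rw [String.toList_ofList]) hcnd.2
        have hle := plen_le_maxL hmemr hres.1 (show (-1 : Int) < plen _ from by rw [hres.2]; omega)
        rw [hK, hres.2] at hle
        have hcast : k + 1 ≤ t0 := by exact_mod_cast hle
        omega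
      · rw [if_neg hcnd]
    rw [getLast?_filterMap_range _ _ (t0 - 1) (by omega) (by rw [hcand, hv]) hafter, hv]
  · have hno : ∀ pr ∈ routes, ¬ (hitP method pr ∧ (-1 : Int) < plen pr) := by
      intro pr hmem hcon
      exact hex ⟨pr, hmem, hcon.1⟩
    have hcands : ∀ k, k < method.toList.length → candB method routes k = none := by
      intro k hk
      unfold candB
      by_cases hcnd : method.toList[k]? = some '.' ∧
          String.ofList (method.toList.take (k + 1) ++ ['*']) ≠ "*.*"
      · rw [if_pos hcnd]
        by_contra hne
        obtain ⟨r, hr⟩ := Option.ne_none_iff_exists'.mp hne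
        have hmemr : (String.ofList (method.toList.take (k + 1) ++ ['*']), r) ∈ routes :=
          PySem.Dict.mem_items_of_get?_eq_some _ hr
        exact hex ⟨_, hmemr,
          (hit_of_key (k := k) hcnd.1 (by rw [String.toList_ofList]) hcnd.2).1⟩
      · rw [if_neg hcnd]
    rw [selA_of_no_hit hno, filterMap_range_none _ _ hcands]
    rfl

-- ===== VERDICT (by name: the statement is the Claim_ definition above) =====
theorem route_for_spec : Claim_equal_route_for := by
  intro method routes _
  unfold Spec_route_for route_for route_for_alt
  cases h0 : (PySem.Dict.mk routes).get? method with
  | some r => rfl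
  | none =>
    simp only [foldA_char, foldB_char, Option.or_none, main_char method routes]
    cases hL : ((List.range method.toList.length).filterMap (candB method routes)).getLast? with
    | some r => rfl
    | none =>
      rw [PySem.Dict.getD_eq_get?_getD]
      cases (PySem.Dict.mk routes).get? "*.*" <;> rfl
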